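-- pv_equiv track=rewrite | github.com/pyparallel/pyparallel | Lib/ctk/path.py | reduce_path
-- ===== SOURCE A (Python) =====
-- def reduce_path(p):
--     assert p and p[0] == '/'
--     r = list()
--     end = p.rfind('/')
--     while end != -1:
--         r.append(p[:end+1])
--         end = p.rfind('/', 0, end)
--     return r
-- ===== SOURCE B (Python) =====
-- def reduce_path(p):
--     assert p and p[0] == '/'
--     r = []
--     acc = ''
--     for c in p:
--         acc += c
--         if c == '/':
--             r.insert(0, acc)
--     return r
-- ===== Notes on version B (the rewrite author's own statement) =====
-- stated objective: alternative
-- what changed: B never slices or searches: it builds each prefix incrementally character by character in one forward pass and prepends the running prefix to the result at every slash, whereas A repeatedly rescans backward with rfind and slices a fresh prefix per hit.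
import Mathlib
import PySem

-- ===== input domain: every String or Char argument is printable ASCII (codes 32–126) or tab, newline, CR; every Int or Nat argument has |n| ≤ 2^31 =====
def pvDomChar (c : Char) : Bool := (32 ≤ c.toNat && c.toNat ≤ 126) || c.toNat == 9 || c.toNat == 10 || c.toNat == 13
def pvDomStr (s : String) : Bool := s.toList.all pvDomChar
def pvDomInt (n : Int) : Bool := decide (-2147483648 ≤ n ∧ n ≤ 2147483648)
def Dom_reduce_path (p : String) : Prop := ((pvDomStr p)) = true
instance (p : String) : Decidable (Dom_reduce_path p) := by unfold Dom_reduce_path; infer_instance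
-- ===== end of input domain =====

-- B never slices or calls rfind: a single forward pass grows the current prefix character by
-- character and prepends it to the result at every slash (alternative decomposition; same cost).

-- ===== PORT A =====
-- the while loop: each iteration appends p[:end+1] and rescans with p.rfind('/', 0, end);
-- the fuel argument (length+1) only makes the same computation total — end strictly decreases.
def reduceGoA (p : String) : Nat → Int → List String → List String
  | 0, _, r => r
  | fuel + 1, e, r =>
    if e = -1 then r
    else reduceGoA p fuel (PySem.Str.rfindFrom p "/" 0 (some e))
           (r ++ [PySem.Str.slice p none (some (e + 1))])

def reduce_path (p : String) : List String :=
  reduceGoA p (p.toList.length + 1) (PySem.Str.rfind p "/") []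

-- ===== PORT B =====
-- for c in p: acc += c; if c == '/': r.insert(0, acc)
def reduceGoB : List Char → List Char → List String → List String
  | [], _, r => r
  | c :: cs, acc, r =>
    let acc' := acc ++ [c]
    reduceGoB cs acc' (if c == '/' then PySem.List.insert r 0 (String.ofList acc') else r)

def reduce_path_alt (p : String) : List String :=
  reduceGoB p.toList [] []

-- ===== PRECONDITION & SPEC =====
-- Pre_ excludes exactly the inputs on which A's (and B's) assert fails (AssertionError):
-- the empty string and strings not starting with '/'.
def Pre_reduce_path (p : String) : Prop := p.toList.head? = some '/'
instance (p : String) : Decidable (Pre_reduce_path p) := by unfold Pre_reduce_path; infer_instance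

def pvWitness_reduce_path : String := "/a/b"

def Spec_reduce_path (p : String) (out : List String) : Prop := out = reduce_path_alt p
instance (p : String) (out : List String) : Decidable (Spec_reduce_path p out) := by unfold Spec_reduce_path; infer_instance

-- ===== CLAIM (what is proved, stated in full; the proofs are below) =====
def Claim_equal_reduce_path : Prop := ∀ (p : String), Dom_reduce_path p → Pre_reduce_path p → Spec_reduce_path p (reduce_path p)

-- ===== LEMMAS AND PROOFS =====

-- proof-side mirror of rfind.go for sub = "/"
def lastSlash (s : List Char) : Nat → Int
  | 0 => if ['/'].isPrefixOf s then 0 else -1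
  | k + 1 => if ['/'].isPrefixOf (s.drop (k + 1)) then ((k : Int) + 1) else lastSlash s k

-- descending list of slash positions ≤ k
def revS (s : List Char) : Nat → List Nat
  | 0 => if ['/'].isPrefixOf s then [0] else []
  | k + 1 => if ['/'].isPrefixOf (s.drop (k + 1)) then (k + 1) :: revS s k else revS s k

theorem go_eq_lastSlash (s : List Char) (k : Nat) :
    PySem.Chars.rfind.go s ['/'] k = lastSlash s k := by
  induction k with
  | zero => simp [PySem.Chars.rfind.go, lastSlash]
  | succ k ih => simp [PySem.Chars.rfind.go, lastSlash, ih]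

theorem lastSlash_eq_revS (s : List Char) (k : Nat) :
    lastSlash s k = match revS s k with | [] => -1 | j :: _ => (j : Int) := by
  induction k with
  | zero => by_cases h : ['/'].isPrefixOf s <;> simp [lastSlash, revS, h]
  | succ k ih =>
    by_cases h : ['/'].isPrefixOf (s.drop (k + 1)) <;> simp [lastSlash, revS, h, ih]

theorem revS_step (s : List Char) (k : Nat) (j : Nat) (rest : List Nat)
    (h : revS s k = j :: rest) :
    j ≤ k ∧ ['/'].isPrefixOf (s.drop j) = true ∧
      rest = (if j = 0 then [] else revS s (j - 1)) := by
  induction k with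
  | zero =>
    by_cases hp : ['/'].isPrefixOf s <;> simp [revS, hp] at h
    obtain ⟨rfl, rfl⟩ := h
    simpa using hp
  | succ k ih =>
    by_cases hp : ['/'].isPrefixOf (s.drop (k + 1)) <;> simp [revS, hp] at h
    · obtain ⟨rfl, rfl⟩ := h
      simp [hp]
    · obtain ⟨hj, h2, h3⟩ := ih h
      exact ⟨Nat.le_succ_of_le hj, h2, h3⟩

theorem prefix_lt_length {s : List Char} {j : Nat}
    (h : ['/'].isPrefixOf (s.drop j) = true) : j < s.length := by
  by_contra hc
  rw [List.drop_eq_nil_of_le (by omega)] at h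
  simp [List.isPrefixOf] at h

theorem isPrefixOf_single_take (c : Char) (x : List Char) (m : Nat) (hm : 1 ≤ m) :
    [c].isPrefixOf (x.take m) = [c].isPrefixOf x := by
  cases x with
  | nil => simp
  | cons a as =>
    obtain ⟨m', rfl⟩ : ∃ m', m = m' + 1 := ⟨m - 1, by omega⟩
    simp [List.isPrefixOf]

theorem lastSlash_take (s : List Char) (j k : Nat) (h : k < j) :
    lastSlash (s.take j) k = lastSlash s k := by
  induction k with
  | zero =>
    have : ['/'].isPrefixOf (s.take j) = ['/'].isPrefixOf s :=
      isPrefixOf_single_take '/' s j (by omega)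
    simp [lastSlash, this]
  | succ k ih =>
    have hd : (s.take j).drop (k + 1) = (s.drop (k + 1)).take (j - (k + 1)) := by
      rw [List.drop_take]
    have : ['/'].isPrefixOf ((s.take j).drop (k + 1)) = ['/'].isPrefixOf (s.drop (k + 1)) := by
      rw [hd]; exact isPrefixOf_single_take '/' _ _ (by omega)
    simp only [lastSlash, this]
    split
    · rfl
    · exact ih (by omega)

theorem rfind_take (s : List Char) (j : Nat) (hj : 1 ≤ j) (hlen : j ≤ s.length) :
    PySem.Chars.rfind (s.take j) ['/'] = lastSlash s (j - 1) := by
  unfold PySem.Chars.rfind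
  rw [go_eq_lastSlash]
  have hl : (s.take j).length = j := by simp; omega
  rw [hl]
  obtain ⟨j', rfl⟩ : ∃ j', j = j' + 1 := ⟨j - 1, by omega⟩
  have hdrop : (s.take (j' + 1)).drop (j' + 1) = [] := List.drop_eq_nil_of_le (by simp)
  simp only [lastSlash, hdrop]
  have hpf : ['/'].isPrefixOf ([] : List Char) = false := by simp [List.isPrefixOf]
  rw [hpf]
  simp only [Bool.false_eq_true, if_false]
  simpa using lastSlash_take s (j' + 1) j' (by omega)

theorem rfindFrom_eq_rfind_take (s : List Char) (j : Nat) (hj : j ≤ s.length) :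
    PySem.Chars.rfindFrom s ['/'] 0 (some (j : Int)) = PySem.Chars.rfind (s.take j) ['/'] := by
  unfold PySem.Chars.rfindFrom
  have hj' : (j : Int) ≤ (s.length : Int) := by exact_mod_cast hj
  have hjn : ¬ ((j : Int) < 0) := by omega
  simp only [hjn, if_false]
  split_ifs <;>
    simp only [Int.toNat_natCast, Int.toNat_zero, List.drop_zero] at * <;> omega

theorem goA_stop (p : String) (f : Nat) (r : List String) : reduceGoA p f (-1) r = r := by
  cases f <;> simp [reduceGoA]

-- the while loop, driven by lastSlash, produces revS's slices
theorem loop_main (p : String) (k : Nat) :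
    ∀ (fuel : Nat) (r : List String), k < fuel →
      reduceGoA p fuel (lastSlash p.toList k) r
        = r ++ (revS p.toList k).map (fun j =>
            PySem.Str.slice p none (some (Int.ofNat j + 1))) := by
  induction k using Nat.strong_induction_on with
  | _ k ih =>
    intro fuel r hfuel
    rw [lastSlash_eq_revS]
    cases hrs : revS p.toList k with
    | nil =>
      rw [goA_stop]
      simp
    | cons j rest =>
      obtain ⟨hjk, hpre, hrest⟩ := revS_step p.toList k j rest hrs
      have hjlen : j < p.toList.length := prefix_lt_length hpre
      obtain ⟨f', rfl⟩ : ∃ f', fuel = f' + 1 := ⟨fuel - 1, by omega⟩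
      have hne : ((j : Int)) ≠ -1 := by omega
      simp only [reduceGoA]
      rw [if_neg hne]
      have hrw : PySem.Str.rfindFrom p "/" 0 (some ((j : Int))) =
          PySem.Chars.rfind (p.toList.take j) ['/'] := by
        rw [PySem.Str.rfindFrom_eq]
        have hsl : "/".toList = ['/'] := rfl
        rw [hsl]
        exact rfindFrom_eq_rfind_take p.toList j (by omega)
      rw [hrw]
      by_cases hj0 : j = 0
      · subst hj0
        have hz : PySem.Chars.rfind (p.toList.take 0) ['/'] = -1 := by
          simp [PySem.Chars.rfind, PySem.Chars.rfind.go, List.isPrefixOf]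
        rw [hz, goA_stop]
        simp [hrest]
      · rw [rfind_take p.toList j (by omega) (by omega)]
        rw [ih (j - 1) (by omega) f' _ (by omega)]
        rw [hrest, if_neg hj0]
        simp

-- B side: ascending list of slash-terminated prefixes emitted by the forward pass
def ascList : List Char → List Char → List String
  | [], _ => []
  | c :: cs, acc =>
    (if c == '/' then [String.ofList (acc ++ [c])] else []) ++ ascList cs (acc ++ [c])

theorem goB_eq (s : List Char) : ∀ (acc : List Char) (r : List String),
    reduceGoB s acc r = (ascList s acc).reverse ++ r := by
  induction s with
  | nil => intro acc r; simp [reduceGoB, ascList]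
  | cons c cs ih =>
    intro acc r
    simp only [reduceGoB, ascList, ih, PySem.List.insert_zero]
    by_cases hc : (c == '/') = true <;> simp [hc]

theorem ascList_eq_filter (s : List Char) : ∀ (acc : List Char),
    ascList s acc
      = ((List.range s.length).filter (fun j => ['/'].isPrefixOf (s.drop j))).map
          (fun j => String.ofList (acc ++ s.take (j + 1))) := by
  induction s with
  | nil => intro acc; simp [ascList]
  | cons c cs ih =>
    intro acc
    rw [List.length_cons, List.range_succ_eq_map, List.filter_cons]
    have hP0 : (['/'].isPrefixOf ((c :: cs).drop 0)) = (c == '/') := by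
      simp [List.isPrefixOf, eq_comm]
    rw [hP0, List.filter_map]
    have htail :
        List.map (fun j => String.ofList (acc ++ (c :: cs).take (j + 1)))
            (List.map Nat.succ
              (List.filter ((fun j => ['/'].isPrefixOf ((c :: cs).drop j)) ∘ Nat.succ)
                (List.range cs.length)))
          = ascList cs (acc ++ [c]) := by
      rw [List.map_map, ih (acc ++ [c])]
      have h1 : ((fun j => ['/'].isPrefixOf ((c :: cs).drop j)) ∘ Nat.succ)
          = (fun j => ['/'].isPrefixOf (cs.drop j)) := by
        funext j; simp
      rw [h1]
      apply List.map_congr_left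
      intro j _
      simp [Function.comp_apply, List.take_succ_cons]
    by_cases hc : (c == '/') = true
    · rw [if_pos hc, List.map_cons, htail]
      simp [ascList, hc]
    · rw [if_neg hc, htail]
      simp [ascList, hc]

theorem range_filter_ext (s : List Char) (m : Nat) :
    (List.range (s.length + m)).filter (fun j => ['/'].isPrefixOf (s.drop j))
      = (List.range s.length).filter (fun j => ['/'].isPrefixOf (s.drop j)) := by
  induction m with
  | zero => rfl
  | succ m ih =>
    have h1 : s.length + (m + 1) = (s.length + m) + 1 := by omega
    rw [h1, List.range_succ, List.filter_append, ih]
    have h2 : s.drop (s.length + m) = [] := List.drop_eq_nil_of_le (by omega)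
    simp [h2]

theorem revS_eq_filter (s : List Char) (k : Nat) :
    revS s k = ((List.range (k + 1)).filter (fun j => ['/'].isPrefixOf (s.drop j))).reverse := by
  induction k with
  | zero => by_cases h : ['/'].isPrefixOf s <;> simp [revS, List.range_succ, h]
  | succ k ih =>
    rw [List.range_succ, List.filter_append, List.reverse_append]
    by_cases h : ['/'].isPrefixOf (s.drop (k + 1)) <;> simp [revS, h, ih]

theorem slice_eq_mk_take (p : String) (j : Nat) :
    PySem.Str.slice p none (some (Int.ofNat j + 1)) = String.ofList (p.toList.take (j + 1)) := by
  simp only [Int.ofNat_eq_natCast]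
  have h0 : (0:Int) ≤ (j:Int) + 1 := by omega
  simp [PySem.Str.slice, PySem.List.slice_to _ h0]

-- ===== VERDICT (by name: the statement is the Claim_ definition above) =====
theorem reduce_path_spec : Claim_equal_reduce_path := by
  intro p _ _
  unfold Spec_reduce_path reduce_path reduce_path_alt
  have hrfind : PySem.Str.rfind p "/" = lastSlash p.toList p.toList.length := by
    rw [PySem.Str.rfind_eq]
    have hsl : "/".toList = ['/'] := rfl
    rw [hsl]
    unfold PySem.Chars.rfind
    exact go_eq_lastSlash p.toList p.toList.length
  rw [hrfind, loop_main p p.toList.length (p.toList.length + 1) [] (by omega)]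
  rw [goB_eq p.toList [] [], ascList_eq_filter p.toList []]
  rw [revS_eq_filter p.toList p.toList.length, range_filter_ext p.toList 1]
  rw [List.map_reverse]
  simp only [List.nil_append, List.append_nil]
  congr 1
  apply List.map_congr_left
  intro j _
  rw [slice_eq_mk_take]
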